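-- pv_equiv track=rewrite | github.com/jihjihk/research-ai-swe-jobs | exploration_archive/v3/scripts/T09_archetype_discovery.py | suggest_name
-- ===== SOURCE A (Python) =====
-- def suggest_name(terms_str):
--     """Simple heuristic name from top terms."""
--     terms = terms_str.split(', ')
--     if not terms:
--         return "Unknown"
--     # Look for patterns
--     term_set = set(t.lower() for t in terms[:10])
--
--     if any(t in term_set for t in ['data', 'analytics', 'pipeline', 'warehouse', 'etl', 'data pipeline', 'data engineering']):
--         return "Data Engineering"
--     if any(t in term_set for t in ['machine learning', 'ml', 'deep learning', 'model', 'models', 'ai']):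
--         return "ML/AI Engineering"
--     if any(t in term_set for t in ['security', 'vulnerability', 'threat', 'cyber', 'compliance']):
--         return "Security Engineering"
--     if any(t in term_set for t in ['cloud', 'aws', 'infrastructure', 'kubernetes', 'terraform', 'devops']):
--         return "Cloud/Infrastructure"
--     if any(t in term_set for t in ['mobile', 'ios', 'android', 'swift', 'kotlin']):
--         return "Mobile Development"
--     if any(t in term_set for t in ['frontend', 'react', 'javascript', 'typescript', 'ui', 'css', 'web']):
--         return "Frontend/Web"
--     if any(t in term_set for t in ['backend', 'api', 'microservices', 'java', 'spring']):
--         return "Backend/API"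
--     if any(t in term_set for t in ['embedded', 'firmware', 'hardware', 'rtos', 'c++']):
--         return "Embedded/Systems"
--     if any(t in term_set for t in ['qa', 'test', 'testing', 'automation', 'quality']):
--         return "QA/Testing"
--     if any(t in term_set for t in ['manager', 'lead', 'leadership', 'architect', 'principal']):
--         return "Technical Leadership"
--     if any(t in term_set for t in ['fullstack', 'full stack']):
--         return "Full-Stack"
--     if any(t in term_set for t in ['platform', 'reliability', 'sre', 'scalability']):
--         return "Platform/SRE"
--     return f"Cluster ({terms[0]})"
-- ===== SOURCE B (Python) =====
-- # Inverted index: one keyword -> (priority, category) dict built once; a single pass over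
-- # the terms keeps the lowest-priority hit, instead of A's twelve chained any() scans.
-- _TABLE = [
--     ("Data Engineering", ('data', 'analytics', 'pipeline', 'warehouse', 'etl', 'data pipeline', 'data engineering')),
--     ("ML/AI Engineering", ('machine learning', 'ml', 'deep learning', 'model', 'models', 'ai')),
--     ("Security Engineering", ('security', 'vulnerability', 'threat', 'cyber', 'compliance')),
--     ("Cloud/Infrastructure", ('cloud', 'aws', 'infrastructure', 'kubernetes', 'terraform', 'devops')),
--     ("Mobile Development", ('mobile', 'ios', 'android', 'swift', 'kotlin')),
--     ("Frontend/Web", ('frontend', 'react', 'javascript', 'typescript', 'ui', 'css', 'web')),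
--     ("Backend/API", ('backend', 'api', 'microservices', 'java', 'spring')),
--     ("Embedded/Systems", ('embedded', 'firmware', 'hardware', 'rtos', 'c++')),
--     ("QA/Testing", ('qa', 'test', 'testing', 'automation', 'quality')),
--     ("Technical Leadership", ('manager', 'lead', 'leadership', 'architect', 'principal')),
--     ("Full-Stack", ('fullstack', 'full stack')),
--     ("Platform/SRE", ('platform', 'reliability', 'sre', 'scalability')),
-- ]
--
-- _KEYWORD_TO = {kw: (i, name) for i, (name, kws) in enumerate(_TABLE) for kw in kws}
--
-- def suggest_name(terms_str):
--     terms = terms_str.split(', ')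
--     if not terms:
--         return "Unknown"
--     best = None
--     for t in terms[:10]:
--         hit = _KEYWORD_TO.get(t.lower())
--         if hit is not None and (best is None or hit[0] < best[0]):
--             best = hit
--     if best is not None:
--         return best[1]
--     return f"Cluster ({terms[0]})"
-- ===== Notes on version B (the rewrite author's own statement) =====
-- stated objective: alternative
-- what changed: Replaces the twelve chained any()-scans over the term set by an inverted keyword->(priority,category) dictionary built once and a single pass over the terms that keeps the lowest-priority hit.
import Mathlib
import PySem

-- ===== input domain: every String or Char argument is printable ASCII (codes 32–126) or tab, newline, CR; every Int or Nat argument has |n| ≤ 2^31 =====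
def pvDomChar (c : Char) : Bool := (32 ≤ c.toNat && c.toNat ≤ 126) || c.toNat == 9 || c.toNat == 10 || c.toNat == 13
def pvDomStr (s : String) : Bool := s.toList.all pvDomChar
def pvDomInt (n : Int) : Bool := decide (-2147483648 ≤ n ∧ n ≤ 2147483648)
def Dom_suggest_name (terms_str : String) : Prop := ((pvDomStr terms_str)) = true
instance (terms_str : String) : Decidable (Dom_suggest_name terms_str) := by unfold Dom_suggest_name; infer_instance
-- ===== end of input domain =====

-- B replaces A's twelve chained any()-scans by an inverted keyword -> (priority, category)
-- dictionary built once and a single pass over the terms keeping the lowest-priority hit.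

-- ===== PORT A =====
-- literal transliteration of A: split, dead empty guard, lowercase first 10 into a set,
-- twelve inlined 'any' branches in order, else "Cluster (terms[0])"
def suggest_name (terms_str : String) : String :=
  match (PySem.Str.split? terms_str ", ").getD [] with
  | [] => "Unknown"          -- Python: if not terms (unreachable; split? is some since ", " is nonempty)
  | t0 :: rest =>
    let terms := t0 :: rest
    let term_set : PySem.Set String :=
      PySem.Set.ofList ((PySem.List.slice terms none (some 10)).map PySem.Str.lower)
    if (["data", "analytics", "pipeline", "warehouse", "etl", "data pipeline", "data engineering"].any
        (fun t => PySem.Set.contains term_set t)) then "Data Engineering"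
    else if (["machine learning", "ml", "deep learning", "model", "models", "ai"].any
        (fun t => PySem.Set.contains term_set t)) then "ML/AI Engineering"
    else if (["security", "vulnerability", "threat", "cyber", "compliance"].any
        (fun t => PySem.Set.contains term_set t)) then "Security Engineering"
    else if (["cloud", "aws", "infrastructure", "kubernetes", "terraform", "devops"].any
        (fun t => PySem.Set.contains term_set t)) then "Cloud/Infrastructure"
    else if (["mobile", "ios", "android", "swift", "kotlin"].any
        (fun t => PySem.Set.contains term_set t)) then "Mobile Development"
    else if (["frontend", "react", "javascript", "typescript", "ui", "css", "web"].any
        (fun t => PySem.Set.contains term_set t)) then "Frontend/Web"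
    else if (["backend", "api", "microservices", "java", "spring"].any
        (fun t => PySem.Set.contains term_set t)) then "Backend/API"
    else if (["embedded", "firmware", "hardware", "rtos", "c++"].any
        (fun t => PySem.Set.contains term_set t)) then "Embedded/Systems"
    else if (["qa", "test", "testing", "automation", "quality"].any
        (fun t => PySem.Set.contains term_set t)) then "QA/Testing"
    else if (["manager", "lead", "leadership", "architect", "principal"].any
        (fun t => PySem.Set.contains term_set t)) then "Technical Leadership"
    else if (["fullstack", "full stack"].any
        (fun t => PySem.Set.contains term_set t)) then "Full-Stack"
    else if (["platform", "reliability", "sre", "scalability"].any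
        (fun t => PySem.Set.contains term_set t)) then "Platform/SRE"
    else "Cluster (" ++ t0 ++ ")"

-- ===== PORT B =====
-- Source B's _TABLE
def pvTable : List (String × List String) :=
  [("Data Engineering", ["data", "analytics", "pipeline", "warehouse", "etl", "data pipeline", "data engineering"]),
   ("ML/AI Engineering", ["machine learning", "ml", "deep learning", "model", "models", "ai"]),
   ("Security Engineering", ["security", "vulnerability", "threat", "cyber", "compliance"]),
   ("Cloud/Infrastructure", ["cloud", "aws", "infrastructure", "kubernetes", "terraform", "devops"]),
   ("Mobile Development", ["mobile", "ios", "android", "swift", "kotlin"]),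
   ("Frontend/Web", ["frontend", "react", "javascript", "typescript", "ui", "css", "web"]),
   ("Backend/API", ["backend", "api", "microservices", "java", "spring"]),
   ("Embedded/Systems", ["embedded", "firmware", "hardware", "rtos", "c++"]),
   ("QA/Testing", ["qa", "test", "testing", "automation", "quality"]),
   ("Technical Leadership", ["manager", "lead", "leadership", "architect", "principal"]),
   ("Full-Stack", ["fullstack", "full stack"]),
   ("Platform/SRE", ["platform", "reliability", "sre", "scalability"])]

-- Source B's _KEYWORD_TO dict comprehension: enumerate the table, one (kw, (i, name)) pair per keyword
def pvKwPairs : List (String × (Int × String)) :=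
  (PySem.List.enumerate pvTable).flatMap (fun p => p.2.2.map (fun kw => (kw, (p.1, p.2.1))))

def pvKwDict : PySem.Dict String (Int × String) := PySem.Dict.ofList pvKwPairs

def suggest_name_alt (terms_str : String) : String :=
  match (PySem.Str.split? terms_str ", ").getD [] with
  | [] => "Unknown"          -- Python: if not terms (unreachable; split? is some since ", " is nonempty)
  | t0 :: rest =>
    let terms := t0 :: rest
    -- for t in terms[:10]: hit = _KEYWORD_TO.get(t.lower()); keep the lower-priority hit
    let best := (PySem.List.slice terms none (some 10)).foldl
      (fun best t =>
        match PySem.Dict.get? pvKwDict (PySem.Str.lower t), best with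
        | some h, none => some h
        | some h, some b => if h.1 < b.1 then some h else some b
        | none, b => b) (none : Option (Int × String))
    match best with
    | some b => b.2
    | none => "Cluster (" ++ t0 ++ ")"

-- ===== PRECONDITION & SPEC =====
def Spec_suggest_name (terms_str : String) (out : String) : Prop := out = suggest_name_alt terms_str
instance (terms_str : String) (out : String) : Decidable (Spec_suggest_name terms_str out) := by unfold Spec_suggest_name; infer_instance

-- ===== CLAIM (what is proved, stated in full; the proofs are below) =====
def Claim_equal_suggest_name : Prop := ∀ (terms_str : String), Dom_suggest_name terms_str → Spec_suggest_name terms_str (suggest_name terms_str)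

-- ===== LEMMAS AND PROOFS =====

-- A's if-chain over the table, abstracted over the (lowered) term list M
def chainT : List (String × List String) → List String → String → String
  | [], _, d => d
  | (n, kws) :: rest, M, d =>
    if kws.any (fun kw => M.contains kw) then n else chainT rest M d

-- the category (index, name) a single term maps to (first table entry containing it)
def classifyT : List (String × List String) → Int → String → Option (Int × String)
  | [], _, _ => none
  | (n, kws) :: rest, k, t => if kws.contains t then some (k, n) else classifyT rest (k + 1) t

-- one step of B's min-priority accumulator loop, abstracted over the classifier C
def stepC (C : String → Option (Int × String)) (best : Option (Int × String)) (t : String) :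
    Option (Int × String) :=
  match C t, best with
  | some h, none => some h
  | some h, some b => if h.1 < b.1 then some h else some b
  | none, b => b

theorem pvContains_ofList (M : List String) (x : String) :
    PySem.Set.contains (PySem.Set.ofList M) x = M.contains x := by
  simp only [PySem.Set.contains_eq_listContains]
  rw [Bool.eq_iff_iff]
  simp [PySem.Set.mem_ofList]

theorem pvAny_swap (as bs : List String) :
    as.any (fun a => bs.contains a) = bs.any (fun b => as.contains b) := by
  rw [Bool.eq_iff_iff]
  simp only [List.any_eq_true, List.contains_iff_mem]
  exact ⟨fun ⟨x, hx, h⟩ => ⟨x, h, hx⟩, fun ⟨x, hx, h⟩ => ⟨x, h, hx⟩⟩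

theorem classifyT_ge (T : List (String × List String)) (k : Int) (t : String) (p : Int × String)
    (h : classifyT T k t = some p) : k ≤ p.1 := by
  induction T generalizing k with
  | nil => simp [classifyT] at h
  | cons e rest ih =>
    obtain ⟨n, kws⟩ := e
    simp only [classifyT] at h
    split at h
    · cases h; simp
    · have := ih (k + 1) h; omega

theorem fold_stepC_const (C : String → Option (Int × String)) (hC : ∀ t, C t = none)
    (M : List String) (b : Option (Int × String)) : M.foldl (stepC C) b = b := by
  induction M generalizing b with
  | nil => rfl
  | cons t M ih => simp only [List.foldl_cons, stepC, hC t]; exact ih b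

theorem fold_stepC_absorb (C : String → Option (Int × String)) (k : Int) (n : String)
    (hge : ∀ t p, C t = some p → k ≤ p.1) (M : List String) :
    M.foldl (stepC C) (some (k, n)) = some (k, n) := by
  induction M with
  | nil => rfl
  | cons t M ih =>
    have hstep : stepC C (some (k, n)) t = some (k, n) := by
      unfold stepC
      cases hC : C t with
      | none => rfl
      | some h =>
        have := hge t h hC
        show (if h.1 < k then some h else some (k, n)) = some (k, n)
        rw [if_neg (by omega)]
    simp only [List.foldl_cons, hstep]; exact ih

theorem fold_stepC_hit (C : String → Option (Int × String)) (k : Int) (n : String)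
    (hge : ∀ t p, C t = some p → k ≤ p.1)
    (hk : ∀ t p, C t = some p → p.1 = k → p = (k, n)) :
    ∀ (M : List String) (b : Option (Int × String)),
      (b = none ∨ b = some (k, n) ∨ ∃ p, b = some p ∧ k < p.1) →
      (∃ t ∈ M, C t = some (k, n)) → M.foldl (stepC C) b = some (k, n) := by
  intro M
  induction M with
  | nil => rintro b _ ⟨t, ht, _⟩; exact absurd ht (List.not_mem_nil)
  | cons t M ih =>
    intro b hInv hex
    by_cases hC : C t = some (k, n)
    · have hstep : stepC C b t = some (k, n) := by
        unfold stepC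
        rw [hC]
        rcases hInv with h | h | ⟨p, h, hp⟩ <;> subst h
        · rfl
        · show (if k < k then some (k, n) else some (k, n)) = some (k, n); simp
        · show (if k < p.1 then some (k, n) else some p) = some (k, n); rw [if_pos hp]
      simp only [List.foldl_cons, hstep]
      exact fold_stepC_absorb C k n hge M
    · -- invariant is preserved by this step
      have hInv' : stepC C b t = none ∨ stepC C b t = some (k, n) ∨
          ∃ p, stepC C b t = some p ∧ k < p.1 := by
        unfold stepC
        cases hCt : C t with
        | none => rcases hInv with h | h | ⟨p, h, hp⟩ <;> subst h
                  · left; rfl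
                  · right; left; rfl
                  · right; right; exact ⟨p, rfl, hp⟩
        | some h =>
          have hgeh := hge t h hCt
          by_cases hk1 : h.1 = k
          · have : h = (k, n) := hk t h hCt hk1
            subst this
            rcases hInv with hb | hb | ⟨p, hb, hp⟩ <;> subst hb
            · right; left; rfl
            · right; left
              show (if k < k then some (k, n) else some (k, n)) = some (k, n); simp
            · right; left
              show (if k < p.1 then some (k, n) else some p) = some (k, n); rw [if_pos hp]
          · have hklt : k < h.1 := by omega
            rcases hInv with hb | hb | ⟨p, hb, hp⟩ <;> subst hb
            · right; right; exact ⟨h, rfl, hklt⟩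
            · right; left
              show (if h.1 < k then some h else some (k, n)) = some (k, n)
              rw [if_neg (by omega)]
            · by_cases hlt : h.1 < p.1
              · right; right
                refine ⟨h, ?_, hklt⟩
                show (if h.1 < p.1 then some h else some p) = some h
                rw [if_pos hlt]
              · right; right
                refine ⟨p, ?_, hp⟩
                show (if h.1 < p.1 then some h else some p) = some p
                rw [if_neg hlt]
      have hex' : ∃ t' ∈ M, C t' = some (k, n) := by
        obtain ⟨t', ht', hCt'⟩ := hex
        rcases List.mem_cons.mp ht' with h | h
        · subst h; exact absurd hCt' hC
        · exact ⟨t', h, hCt'⟩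
      simp only [List.foldl_cons]
      exact ih (stepC C b t) hInv' hex'

-- MAIN: B's min-priority fold computes exactly A's first-match chain
theorem fold_eq_chain (T : List (String × List String)) (k : Int) (M : List String) (d : String) :
    (match M.foldl (stepC (classifyT T k)) none with
     | some b => b.2
     | none => d) = chainT T M d := by
  induction T generalizing k with
  | nil =>
    rw [fold_stepC_const (classifyT [] k) (fun t => rfl) M none]
    rfl
  | cons e rest ih =>
    obtain ⟨n, kws⟩ := e
    by_cases hc : kws.any (fun kw => M.contains kw) = true
    · -- some term hits this category: the fold returns (k, n)
      have hM : M.any (fun t => kws.contains t) = true := by rw [← pvAny_swap]; exact hc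
      obtain ⟨t, ht, hkt⟩ := List.any_eq_true.mp hM
      have hge : ∀ t p, classifyT ((n, kws) :: rest) k t = some p → k ≤ p.1 :=
        fun t p h => classifyT_ge _ k t p h
      have hk : ∀ t p, classifyT ((n, kws) :: rest) k t = some p → p.1 = k → p = (k, n) := by
        intro t p h hp1
        simp only [classifyT] at h
        split at h
        · cases h; rfl
        · have := classifyT_ge rest (k + 1) t p h; omega
      have hfold : M.foldl (stepC (classifyT ((n, kws) :: rest) k)) none = some (k, n) := by
        refine fold_stepC_hit _ k n hge hk M none (Or.inl rfl) ⟨t, ht, ?_⟩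
        unfold classifyT
        rw [hkt]
        rfl
      rw [hfold]
      simp only [chainT]
      rw [if_pos hc]
    · -- no term hits this category: classify passes through to the rest of the table
      have hnone : ∀ t ∈ M, kws.contains t = false := by
        intro t ht
        cases hcs : kws.contains t
        · rfl
        · exact absurd (show (kws.any fun kw => M.contains kw) = true by
            rw [pvAny_swap]; exact List.any_eq_true.mpr ⟨t, ht, hcs⟩) hc
      have hcongr : M.foldl (stepC (classifyT ((n, kws) :: rest) k)) none
          = M.foldl (stepC (classifyT rest (k + 1))) none := by
        apply PySem.List.foldl_congr_mem
        intro acc t ht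
        unfold stepC
        rw [show classifyT ((n, kws) :: rest) k t = classifyT rest (k + 1) t by
          conv_lhs => simp only [classifyT]
          rw [hnone t ht]
          simp]
      rw [hcongr, ih (k + 1)]
      simp only [chainT]
      rw [if_neg hc]

-- lookup in a dict block of keywords all mapped to the same value
theorem get?_mk_block (v : Int × String) (kws : List String)
    (rest : List (String × (Int × String))) (t : String) :
    PySem.Dict.get? (PySem.Dict.mk (kws.map (fun kw => (kw, v)) ++ rest)) t
      = if kws.contains t then some v else PySem.Dict.get? (PySem.Dict.mk rest) t := by
  induction kws with
  | nil => simp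
  | cons kw kws ih =>
    by_cases h : kw = t
    · subst h
      simp [PySem.Dict.get?_mk_cons]
    · simp only [List.map_cons, List.cons_append, PySem.Dict.get?_mk_cons,
        List.contains_cons]
      rw [if_neg (by simpa using h), ih]
      have : (t == kw) = false := by simpa using Ne.symm h
      rw [this]
      simp

theorem pvDict_eq (t : String) :
    PySem.Dict.get? pvKwDict t = classifyT pvTable 0 t := by
  have hD : pvKwDict = PySem.Dict.mk pvKwPairs := by
    set_option maxRecDepth 10000 in decide
  have hP : pvKwPairs =
      (["data", "analytics", "pipeline", "warehouse", "etl", "data pipeline", "data engineering"].map (fun kw => (kw, ((0 : Int), "Data Engineering")))) ++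
      ((["machine learning", "ml", "deep learning", "model", "models", "ai"].map (fun kw => (kw, ((1 : Int), "ML/AI Engineering")))) ++
      ((["security", "vulnerability", "threat", "cyber", "compliance"].map (fun kw => (kw, ((2 : Int), "Security Engineering")))) ++
      ((["cloud", "aws", "infrastructure", "kubernetes", "terraform", "devops"].map (fun kw => (kw, ((3 : Int), "Cloud/Infrastructure")))) ++
      ((["mobile", "ios", "android", "swift", "kotlin"].map (fun kw => (kw, ((4 : Int), "Mobile Development")))) ++
      ((["frontend", "react", "javascript", "typescript", "ui", "css", "web"].map (fun kw => (kw, ((5 : Int), "Frontend/Web")))) ++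
      ((["backend", "api", "microservices", "java", "spring"].map (fun kw => (kw, ((6 : Int), "Backend/API")))) ++
      ((["embedded", "firmware", "hardware", "rtos", "c++"].map (fun kw => (kw, ((7 : Int), "Embedded/Systems")))) ++
      ((["qa", "test", "testing", "automation", "quality"].map (fun kw => (kw, ((8 : Int), "QA/Testing")))) ++
      ((["manager", "lead", "leadership", "architect", "principal"].map (fun kw => (kw, ((9 : Int), "Technical Leadership")))) ++
      ((["fullstack", "full stack"].map (fun kw => (kw, ((10 : Int), "Full-Stack")))) ++
      ((["platform", "reliability", "sre", "scalability"].map (fun kw => (kw, ((11 : Int), "Platform/SRE")))) ++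
      ([] : List (String × (Int × String)))))))))))))) := by decide
  rw [hD, hP]
  simp only [get?_mk_block, classifyT, pvTable]
  norm_num [PySem.Dict.get?]

-- ===== VERDICT (by name: the statement is the Claim_ definition above) =====
theorem suggest_name_spec : Claim_equal_suggest_name := by
  intro terms_str _
  unfold Spec_suggest_name suggest_name suggest_name_alt
  cases (PySem.Str.split? terms_str ", ").getD [] with
  | nil => rfl
  | cons t0 rest =>
    simp only [pvDict_eq, pvContains_ofList]
    rw [show (fun (best : Option (Int × String)) (t : String) =>
          match classifyT pvTable 0 (PySem.Str.lower t), best with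
          | some h, none => some h
          | some h, some b => if h.1 < b.1 then some h else some b
          | none, b => b)
        = fun best t => stepC (classifyT pvTable 0) best (PySem.Str.lower t) from rfl]
    rw [show ((PySem.List.slice (t0 :: rest) none (some 10)).foldl
          (fun best t => stepC (classifyT pvTable 0) best (PySem.Str.lower t)) none)
        = ((PySem.List.slice (t0 :: rest) none (some 10)).map PySem.Str.lower).foldl
            (stepC (classifyT pvTable 0)) none from (List.foldl_map).symm]
    rw [fold_eq_chain]
    simp only [chainT, pvTable]
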